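-- pv_equiv track=rewrite | github.com/cymir01/CS1-25-26 | tc1_25-26_varias_soluciones.py | merge_timelines2
-- ===== SOURCE A (Python) =====
-- def selection_sort(numbers):
--     for i in range(len(numbers) - 1):
--         for j in range(i + 1, len(numbers)):
--             if numbers[j] <= numbers[i]:
--                 numbers[j], numbers[i] = numbers[i], numbers[j]
--     return numbers
--
-- def merge_timelines2(timelines):
--     timelines_list = []
--     for i in timelines:
--         for j in i:
--             timelines_list.append(j)
--
--     dedupled_list = []
--     for timeline in timelines_list:
--         if timeline not in dedupled_list:
--             dedupled_list.append(timeline)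
--
--     sorted_list = selection_sort(dedupled_list)
--
--     return sorted_list
-- ===== SOURCE B (Python) =====
-- def merge_timelines2(timelines):
--     flat = []
--     for timeline in timelines:
--         flat += timeline
--     flat.sort()
--     result = []
--     for x in flat:
--         if result and result[-1] == x:
--             continue
--         result.append(x)
--     return result
-- ===== Notes on version B (the rewrite author's own statement) =====
-- stated objective: faster
-- what changed: B flattens, sorts the whole flat list once with the builtin sort, and dedupes by adjacency in one linear scan, instead of A's quadratic membership-test dedup followed by a quadratic selection sort.
import Mathlib
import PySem

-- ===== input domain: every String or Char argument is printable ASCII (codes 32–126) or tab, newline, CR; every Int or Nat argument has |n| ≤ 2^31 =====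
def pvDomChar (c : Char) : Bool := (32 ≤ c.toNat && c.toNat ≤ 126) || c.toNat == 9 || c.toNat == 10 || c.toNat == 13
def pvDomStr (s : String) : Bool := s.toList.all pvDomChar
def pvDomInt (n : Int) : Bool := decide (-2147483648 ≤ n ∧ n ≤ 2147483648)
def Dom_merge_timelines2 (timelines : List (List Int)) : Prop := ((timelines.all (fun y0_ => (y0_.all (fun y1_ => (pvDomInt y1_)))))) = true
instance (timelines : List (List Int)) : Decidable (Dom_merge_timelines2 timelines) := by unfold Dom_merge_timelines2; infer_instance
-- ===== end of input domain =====

-- B replaces A's quadratic membership dedup + quadratic selection sort by one builtin sort of the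
-- flattened list followed by a linear adjacency dedup (objective: faster).

-- ===== PORT A =====
-- inner loop 'for j in range(i + 1, len(numbers)): if numbers[j] <= numbers[i]: swap'
def ssInner (l : List Int) (i : Int) (n : Int) : List Int :=
  (PySem.List.pyRange (i + 1) n 1).foldl (fun l j =>
    let a := PySem.List.pyGetD l j 0
    let b := PySem.List.pyGetD l i 0
    if a ≤ b then PySem.List.pySetD (PySem.List.pySetD l j b) i a else l) l

def selection_sort (numbers : List Int) : List Int :=
  (PySem.List.pyRange 0 ((numbers.length : Int) - 1) 1).foldl
    (fun l i => ssInner l i (numbers.length : Int)) numbers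

def merge_timelines2 (timelines : List (List Int)) : List Int :=
  let timelines_list := timelines.foldl (fun acc i => i.foldl (fun acc j => acc ++ [j]) acc) []
  let dedupled_list := timelines_list.foldl
    (fun acc timeline => if timeline ∈ acc then acc else acc ++ [timeline]) []
  selection_sort dedupled_list

-- ===== PORT B =====
def merge_timelines2_alt (timelines : List (List Int)) : List Int :=
  let flat := timelines.foldl (fun acc timeline => acc ++ timeline) []
  let flatSorted := PySem.List.sorted flat (fun x => x) false
  flatSorted.foldl (fun result x => if result.getLast? = some x then result else result ++ [x]) []

-- ===== PRECONDITION & SPEC =====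
def Spec_merge_timelines2 (timelines : List (List Int)) (out : List Int) : Prop := out = merge_timelines2_alt timelines
instance (timelines : List (List Int)) (out : List Int) : Decidable (Spec_merge_timelines2 timelines out) := by unfold Spec_merge_timelines2; infer_instance

-- ===== CLAIM (what is proved, stated in full; the proofs are below) =====
def Claim_equal_merge_timelines2 : Prop := ∀ (timelines : List (List Int)), Dom_merge_timelines2 timelines → Spec_merge_timelines2 timelines (merge_timelines2 timelines)

-- ===== LEMMAS AND PROOFS =====

-- A-side model of the selection sort: selMin v ys is (final pivot, the rewritten tail positions)
def selMin (v : Int) : List Int → Int × List Int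
  | [] => (v, [])
  | y :: ys =>
    if y ≤ v then ((selMin y ys).1, v :: (selMin y ys).2)
    else ((selMin v ys).1, y :: (selMin v ys).2)

theorem selMin_snd_length (v : Int) (ys : List Int) : (selMin v ys).2.length = ys.length := by
  induction ys generalizing v with
  | nil => rfl
  | cons y ys ih => simp only [selMin]; split <;> simp [ih]

def selRec : List Int → List Int
  | [] => []
  | x :: xs => (selMin x xs).1 :: selRec (selMin x xs).2
termination_by l => l.length
decreasing_by simp [selMin_snd_length]

theorem getD_append_cons (p ys : List Int) (y : Int) : (p ++ y :: ys).getD p.length 0 = y := by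
  induction p with
  | nil => rfl
  | cons a p ih => simp only [List.cons_append, List.length_cons, List.getD_cons_succ]; exact ih
theorem set_append_cons (p ys : List Int) (y w : Int) :
    (p ++ y :: ys).set p.length w = p ++ w :: ys := by
  induction p with
  | nil => rfl
  | cons a p ih => simp [ih]

theorem inner_go (pre : List Int) (todo done : List Int) (v : Int) :
    (PySem.List.pyRange ((pre.length : Int) + 1 + done.length)
        ((pre.length : Int) + 1 + done.length + todo.length) 1).foldl
      (fun l j =>
        let a := PySem.List.pyGetD l j 0
        let b := PySem.List.pyGetD l (pre.length : Int) 0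
        if a ≤ b then PySem.List.pySetD (PySem.List.pySetD l j b) (pre.length : Int) a else l)
      (pre ++ v :: done ++ todo)
    = pre ++ (selMin v todo).1 :: done ++ (selMin v todo).2 := by
  induction todo generalizing done v with
  | nil =>
    rw [PySem.List.pyRange_one_eq_nil (by simp)]
    simp [selMin]
  | cons y ys ih =>
    rw [PySem.List.pyRange_one_cons (by simp only [List.length_cons]; omega), List.foldl_cons]
    have hj : ((pre.length : Int) + 1 + (done.length : Int)) = (((pre ++ v :: done).length : Nat) : Int) := by
      simp; ring
    have hshape : pre ++ v :: done ++ y :: ys = (pre ++ v :: done) ++ y :: ys := by simp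
    have ha : PySem.List.pyGetD (pre ++ v :: done ++ y :: ys) ((pre.length : Int) + 1 + (done.length : Int)) 0 = y := by
      rw [hj, PySem.List.pyGetD_natCast, hshape, getD_append_cons]
    have hb : PySem.List.pyGetD (pre ++ v :: done ++ y :: ys) ((pre.length : Int)) 0 = v := by
      rw [PySem.List.pyGetD_natCast, List.append_assoc]
      exact getD_append_cons pre (done ++ y :: ys) v
    simp only [ha, hb]
    by_cases hyv : y ≤ v
    · have hset1 : PySem.List.pySetD (pre ++ v :: done ++ y :: ys) (((pre ++ v :: done).length : Nat) : Int) v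
          = pre ++ v :: done ++ v :: ys := by
        rw [PySem.List.pySetD_natCast]; exact set_append_cons (pre ++ v :: done) ys y v
      have hset2 : PySem.List.pySetD (pre ++ v :: done ++ v :: ys) ((pre.length : Int)) y
          = pre ++ y :: (done ++ v :: ys) := by
        rw [PySem.List.pySetD_natCast, List.append_assoc]
        exact set_append_cons pre (done ++ v :: ys) v y
      rw [if_pos hyv, hj, hset1, hset2]
      have h := ih (done ++ [v]) y
      simp only [List.length_append, List.length_cons, List.length_nil, Nat.cast_add,
        Nat.cast_one, List.append_assoc, List.cons_append,
        List.nil_append] at h ⊢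
      simp only [selMin, if_pos hyv]
      convert h using 3
      all_goals (push_cast; ring)
    · rw [if_neg hyv]
      have h := ih (done ++ [y]) v
      simp only [List.length_append, List.length_cons, List.length_nil, Nat.cast_add,
        Nat.cast_one, List.append_assoc, List.cons_append,
        List.nil_append] at h ⊢
      simp only [selMin, if_neg hyv]
      convert h using 3
      all_goals (push_cast; ring)
theorem ssInner_eq (pre rest : List Int) (v : Int) :
    ssInner (pre ++ v :: rest) (pre.length : Int) ((pre.length : Int) + 1 + rest.length)
      = pre ++ (selMin v rest).1 :: (selMin v rest).2 := by
  have h := inner_go pre rest [] v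
  simpa [ssInner] using h

theorem outer_go (k : Nat) (todo pre : List Int) (hk : todo.length = k) :
    (PySem.List.pyRange (pre.length : Int) ((pre.length : Int) + todo.length - 1) 1).foldl
      (fun l i => ssInner l i ((pre.length : Int) + todo.length)) (pre ++ todo)
    = pre ++ selRec todo := by
  induction k generalizing todo pre with
  | zero =>
    rcases List.length_eq_zero_iff.mp hk with rfl
    rw [PySem.List.pyRange_one_eq_nil (by simp)]
    simp [selRec]
  | succ n ih =>
    cases todo with
    | nil => simp at hk
    | cons x xs =>
      cases xs with
      | nil =>
        rw [PySem.List.pyRange_one_eq_nil (by simp)]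
        simp [selRec, selMin]
      | cons z zs =>
        rw [PySem.List.pyRange_one_cons (by simp only [List.length_cons]; omega),
          List.foldl_cons,
          show ((pre.length : Int) + ((x :: z :: zs).length : Int))
              = ((pre.length : Int) + 1 + ((z :: zs).length : Int)) from by simp only [List.length_cons]; push_cast; ring,
          ssInner_eq pre (z :: zs) x, selRec]
        have h := ih (selMin x (z :: zs)).2 (pre ++ [(selMin x (z :: zs)).1])
          (by simp only [selMin_snd_length, List.length_cons] at hk ⊢; omega)
        simp only [List.length_append, List.length_cons, List.length_nil, selMin_snd_length,
          List.append_assoc, List.cons_append, List.nil_append] at h ⊢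
        push_cast at h ⊢
        ring_nf at h ⊢
        exact h
theorem selection_sort_eq_selRec (l : List Int) : selection_sort l = selRec l := by
  have h := outer_go l.length l [] rfl
  simpa [selection_sort] using h

theorem selMin_perm (v : Int) (ys : List Int) :
    ((selMin v ys).1 :: (selMin v ys).2).Perm (v :: ys) := by
  induction ys generalizing v with
  | nil => rfl
  | cons y ys ih =>
    simp only [selMin]
    split
    · show ((selMin y ys).1 :: v :: (selMin y ys).2).Perm (v :: y :: ys)
      exact (List.Perm.swap v (selMin y ys).1 (selMin y ys).2).trans ((ih y).cons v)
    · show ((selMin v ys).1 :: y :: (selMin v ys).2).Perm (v :: y :: ys)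
      exact ((List.Perm.swap y (selMin v ys).1 (selMin v ys).2).trans ((ih v).cons y)).trans
        (List.Perm.swap v y ys)

theorem selMin_min (v : Int) (ys : List Int) :
    (selMin v ys).1 ≤ v ∧ ∀ z ∈ (selMin v ys).2, (selMin v ys).1 ≤ z := by
  induction ys generalizing v with
  | nil => simp [selMin]
  | cons y ys ih =>
    simp only [selMin]
    split
    · rename_i h
      show (selMin y ys).1 ≤ v ∧ ∀ z ∈ v :: (selMin y ys).2, (selMin y ys).1 ≤ z
      refine ⟨le_trans (ih y).1 h, ?_⟩
      intro z hz
      rcases List.mem_cons.1 hz with rfl | hz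
      · exact le_trans (ih y).1 h
      · exact (ih y).2 z hz
    · rename_i h
      show (selMin v ys).1 ≤ v ∧ ∀ z ∈ y :: (selMin v ys).2, (selMin v ys).1 ≤ z
      refine ⟨(ih v).1, ?_⟩
      intro z hz
      rcases List.mem_cons.1 hz with rfl | hz
      · exact le_trans (ih v).1 (le_of_lt (lt_of_not_ge h))
      · exact (ih v).2 z hz

theorem selRec_perm (l : List Int) : (selRec l).Perm l := by
  induction hn : l.length using Nat.strong_induction_on generalizing l with
  | _ n ih =>
    cases l with
    | nil => simp [selRec]
    | cons x xs =>
      rw [selRec]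
      have hlt : (selMin x xs).2.length < n := by simp [selMin_snd_length, ← hn]
      exact ((ih _ hlt _ rfl).cons (selMin x xs).1).trans (selMin_perm x xs)

theorem selRec_pairwise (l : List Int) : (selRec l).Pairwise (· ≤ ·) := by
  induction hn : l.length using Nat.strong_induction_on generalizing l with
  | _ n ih =>
    cases l with
    | nil => simp [selRec]
    | cons x xs =>
      rw [selRec]
      have hlt : (selMin x xs).2.length < n := by simp [selMin_snd_length, ← hn]
      refine List.pairwise_cons.2 ⟨?_, ih _ hlt _ rfl⟩
      intro z hz
      exact (selMin_min x xs).2 z ((selRec_perm _).mem_iff.1 hz)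

-- membership dedup fold (A)
theorem mem_dedup_foldl (l : List Int) (acc : List Int) (y : Int) :
    y ∈ l.foldl (fun acc t => if t ∈ acc then acc else acc ++ [t]) acc ↔ y ∈ acc ∨ y ∈ l := by
  induction l generalizing acc with
  | nil => simp
  | cons x l ih =>
    simp only [List.foldl_cons]
    split
    · rename_i hx
      rw [ih]
      constructor
      · rintro (h | h) <;> simp [h]
      · rintro (h | h)
        · exact Or.inl h
        · rcases List.mem_cons.1 h with rfl | h
          · exact Or.inl hx
          · exact Or.inr h
    · rw [ih]; simp [or_assoc]

theorem nodup_dedup_foldl (l : List Int) (acc : List Int) (hacc : acc.Nodup) :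
    (l.foldl (fun acc t => if t ∈ acc then acc else acc ++ [t]) acc).Nodup := by
  induction l generalizing acc with
  | nil => exact hacc
  | cons x l ih =>
    simp only [List.foldl_cons]
    split
    · exact ih acc hacc
    · rename_i hx
      exact ih _ (List.Nodup.append hacc (List.nodup_singleton x)
        (by simpa [List.disjoint_singleton] using hx))

theorem foldl_append_eq_flatten (ts : List (List Int)) (acc : List Int) :
    ts.foldl (fun a t => a ++ t) acc = acc ++ ts.flatten := by
  induction ts generalizing acc with
  | nil => simp
  | cons t ts ih => simp [ih, List.append_assoc]

theorem pairwise_lt_le_getLast (l : List Int) (m a : Int)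
    (hp : l.Pairwise (· < ·)) (hm : l.getLast? = some m) (ha : a ∈ l) : a ≤ m := by
  obtain ⟨l', rfl⟩ := List.getLast?_eq_some_iff.mp hm
  rcases List.mem_append.1 ha with h | h
  · exact le_of_lt ((List.pairwise_append.1 hp).2.2 a h m (List.mem_singleton_self m))
  · simp_all

-- adjacency dedup fold (B)
theorem adj_dedup_invariant (xs acc : List Int)
    (hxs : xs.Pairwise (· ≤ ·)) (hacc : acc.Pairwise (· < ·))
    (hle : ∀ a ∈ acc, ∀ x ∈ xs, a ≤ x) :
    (xs.foldl (fun result x => if result.getLast? = some x then result else result ++ [x]) acc).Pairwise (· < ·)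
    ∧ ∀ y, (y ∈ xs.foldl (fun result x => if result.getLast? = some x then result else result ++ [x]) acc ↔ y ∈ acc ∨ y ∈ xs) := by
  induction xs generalizing acc with
  | nil => exact ⟨hacc, by simp⟩
  | cons x xs ih =>
    simp only [List.foldl_cons]
    have hxs' : xs.Pairwise (· ≤ ·) := (List.pairwise_cons.1 hxs).2
    by_cases hx : acc.getLast? = some x
    · rw [if_pos hx]
      have hxmem : x ∈ acc := List.mem_of_getLast? hx
      have h := ih acc hxs' hacc (fun a ha z hz => hle a ha z (List.mem_cons_of_mem x hz))
      refine ⟨h.1, fun y => (h.2 y).trans ?_⟩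
      constructor
      · rintro (hy | hy)
        · exact Or.inl hy
        · exact Or.inr (List.mem_cons_of_mem x hy)
      · rintro (hy | hy)
        · exact Or.inl hy
        · rcases List.mem_cons.1 hy with rfl | hy
          · exact Or.inl hxmem
          · exact Or.inr hy
    · rw [if_neg hx]
      have hacc' : (acc ++ [x]).Pairwise (· < ·) := by
        refine List.pairwise_append.2 ⟨hacc, List.pairwise_singleton _ _, ?_⟩
        intro a ha b hb
        rcases List.mem_singleton.1 hb with rfl
        cases hL : acc.getLast? with
        | none =>
          rw [List.getLast?_eq_none_iff] at hL
          subst hL; cases ha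
        | some last =>
          have hlast : last ∈ acc := List.mem_of_getLast? hL
          have h1 : a ≤ last := pairwise_lt_le_getLast acc last a hacc hL ha
          have h2 : last ≤ b := hle last hlast b (List.mem_cons_self ..)
          have h3 : last ≠ b := fun he => hx (he ▸ hL)
          exact lt_of_le_of_lt h1 (lt_of_le_of_ne h2 h3)
      have hle' : ∀ a ∈ acc ++ [x], ∀ z ∈ xs, a ≤ z := by
        intro a ha z hz
        rcases List.mem_append.1 ha with ha | ha
        · exact hle a ha z (List.mem_cons_of_mem x hz)
        · rcases List.mem_singleton.1 ha with rfl
          exact (List.pairwise_cons.1 hxs).1 z hz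
      have h := ih (acc ++ [x]) hxs' hacc' hle'
      refine ⟨h.1, fun y => (h.2 y).trans ?_⟩
      simp [or_assoc]

-- ===== VERDICT (by name: the statement is the Claim_ definition above) =====
theorem merge_timelines2_spec : Claim_equal_merge_timelines2 := by
  intro t _
  show merge_timelines2 t = merge_timelines2_alt t
  simp only [merge_timelines2, merge_timelines2_alt]
  rw [selection_sort_eq_selRec]
  simp only [PySem.List.foldl_append_singleton, foldl_append_eq_flatten, List.nil_append]
  -- A-side
  set D := t.flatten.foldl (fun acc timeline => if timeline ∈ acc then acc else acc ++ [timeline]) [] with hDdef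
  have hD_nodup : D.Nodup := nodup_dedup_foldl _ [] (by simp)
  have hD_mem : ∀ y, y ∈ D ↔ y ∈ t.flatten := by
    intro y; rw [hDdef, mem_dedup_foldl]; simp
  have hA_pair : (selRec D).Pairwise (· ≤ ·) := selRec_pairwise D
  have hA_nodup : (selRec D).Nodup := (selRec_perm D).nodup_iff.2 hD_nodup
  have hA_mem : ∀ y, y ∈ selRec D ↔ y ∈ t.flatten :=
    fun y => ((selRec_perm D).mem_iff).trans (hD_mem y)
  have hA_lt : (selRec D).Pairwise (· < ·) :=
    (hA_pair.and hA_nodup).imp (fun h => lt_of_le_of_ne h.1 h.2)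
  -- B-side
  set S := PySem.List.sorted t.flatten (fun x => x) false with hSdef
  have hS_pair : S.Pairwise (· ≤ ·) := PySem.List.sorted_pairwise t.flatten (fun x => x)
  have hB := adj_dedup_invariant S [] hS_pair (by simp) (by simp)
  set R := S.foldl (fun result x => if result.getLast? = some x then result else result ++ [x]) []
  have hB_mem : ∀ y, y ∈ R ↔ y ∈ t.flatten := by
    intro y
    rw [hB.2 y, hSdef, PySem.List.mem_sorted]
    simp
  have hB_nodup : R.Nodup := hB.1.imp ne_of_lt
  -- combine
  have hperm : (selRec D).Perm R := by
    rw [List.perm_ext_iff_of_nodup hA_nodup hB_nodup]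
    intro y
    rw [hA_mem y, hB_mem y]
  exact PySem.List.eq_of_perm_of_pairwise_le_of_injective (fun x => x) (fun a b h => h) hperm
    hA_pair (hB.1.imp le_of_lt)
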